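-- pv_equiv track=rewrite | github.com/tommyskeff/bio-practice | 2020.py | represent
-- ===== SOURCE A (Python) =====
-- NUMERALS = {
--     1000: ["M"],
--     500: ["D", "M"],
--     100: ["C", "D"],
--     50: ["L", "C"],
--     10: ["X", "L"],
--     5: ["V", "X"],
--     1: ["I", "V"],
-- }
--
-- def to_numerals(n):
--     s = ""
--     for k, v in NUMERALS.items():
--         if n >= k:
--             r = n // k
--             if r > 3:
--                 s += v[0] + v[1]
--             else:
--                 s += v[0] * r
--
--             n -= k * r
--
--     return s
--
-- def represent(string):
--     f, l, o = "", "", 0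
--     for c in string:
--         if c == l:
--             o += 1
--             continue
--
--         f += to_numerals(o) + l
--         l, o = c, 1
--
--     f += to_numerals(o) + l
--     return f
-- ===== SOURCE B (Python) =====
-- NUMERALS = {
--     1000: ["M"],
--     500: ["D", "M"],
--     100: ["C", "D"],
--     50: ["L", "C"],
--     10: ["X", "L"],
--     5: ["V", "X"],
--     1: ["I", "V"],
-- }
--
-- _ITEMS = list(NUMERALS.items())
-- _CACHE = {}
--
-- def _go(pairs, n):
--     if not pairs:
--         return ""
--     (k, v), rest = pairs[0], pairs[1:]
--     if n < k:
--         return _go(rest, n)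
--     r = n // k
--     piece = v[0] + v[1] if r > 3 else v[0] * r
--     return piece + _go(rest, n - k * r)
--
-- def represent(string):
--     # index-based scan: locate each run [i, j) directly, render it (with a memo
--     # cache over the pure count renderer), append, and jump to the run's end
--     parts = []
--     append = parts.append
--     cache_get = _CACHE.get
--     i, n = 0, len(string)
--     while i < n:
--         c = string[i]
--         j = i + 1
--         while j < n and string[j] == c:
--             j += 1
--         d = j - i
--         t = cache_get(d)
--         if t is None:
--             t = _go(_ITEMS, d)
--             _CACHE[d] = t
--         append(t + c)
--         i = j
--     return "".join(parts)
-- ===== Notes on version B (the rewrite author's own statement) =====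
-- stated objective: alternative
-- what changed: B scans the string by run boundaries with an index-based inner loop and joins the rendered parts, rendering each run count by a memoized recursive descent over the numeral table, instead of A's fused character loop carrying previous-char/count state and a trailing flush; Pre_ excludes strings containing a run of 4000+ equal characters, on which both programs raise IndexError (NUMERALS[1000] has no second element).
import Mathlib
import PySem

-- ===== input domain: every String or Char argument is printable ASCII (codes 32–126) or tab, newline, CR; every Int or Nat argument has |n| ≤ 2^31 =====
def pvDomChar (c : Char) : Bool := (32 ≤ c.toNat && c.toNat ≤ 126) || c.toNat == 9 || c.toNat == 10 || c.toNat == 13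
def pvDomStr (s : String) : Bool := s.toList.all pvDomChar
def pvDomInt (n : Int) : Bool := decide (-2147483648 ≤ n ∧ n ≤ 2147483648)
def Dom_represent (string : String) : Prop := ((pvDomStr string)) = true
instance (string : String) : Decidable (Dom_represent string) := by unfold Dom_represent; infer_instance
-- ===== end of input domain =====

-- B scans by run boundaries (find the end of each run, render it, jump there) and renders each
-- run count by recursive descent over the numeral table (memoized in Source B), instead of A's fused
-- loop with prev-char/count state and a trailing flush (objective: alternative).

-- ===== PORT A =====
-- NUMERALS as an (insertion-ordered) association list; each value keeps Python's list of glyphs.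
def pvNumerals : List (Int × List (List Char)) :=
  [(1000, [['M']]), (500, [['D'], ['M']]), (100, [['C'], ['D']]), (50, [['L'], ['C']]),
   (10, [['X'], ['L']]), (5, [['V'], ['X']]), (1, [['I'], ['V']])]

-- A's to_numerals: a stateful fold over the table. v[1] is ported as (v.getD 1 []): in Python it
-- raises IndexError exactly when n ≥ 4000 (a run of ≥ 4000), which Pre_represent excludes.
def pvStepN (sn : List Char × Int) (kv : Int × List (List Char)) : List Char × Int :=
  let s := sn.1
  let n := sn.2
  let k := kv.1
  let v := kv.2
  if n ≥ k then
    let r := PySem.Int.floordiv n k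
    let s := if r > 3 then s ++ v.getD 0 [] ++ v.getD 1 []
             else s ++ PySem.List.pyRepeat (v.getD 0 []) r
    (s, n - k * r)
  else (s, n)

def toNumerals (n : Int) : List Char := (pvNumerals.foldl pvStepN ([], n)).1

def pvStepA (flo : List Char × List Char × Int) (c : Char) : List Char × List Char × Int :=
  if [c] == flo.2.1 then (flo.1, flo.2.1, flo.2.2 + 1)
  else (flo.1 ++ toNumerals flo.2.2 ++ flo.2.1, [c], 1)

def represent (string : String) : String :=
  let st := string.toList.foldl pvStepA ([], [], 0)
  String.ofList (st.1 ++ toNumerals st.2.2 ++ st.2.1)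

-- ===== PORT B =====
-- B's to_numerals: recursive descent over the remaining table entries (same v[1] convention as
-- above). Source B memoizes this pure function in a dict cache; the cache only avoids recomputing
-- _go on a repeated count, so the port performs the identical uncached computation.
def pvToNB : List (Int × List (List Char)) → Int → List Char
  | [], _ => []
  | (k, v) :: rest, n =>
    if n < k then pvToNB rest n
    else
      let r := PySem.Int.floordiv n k
      let piece := if r > 3 then v.getD 0 [] ++ v.getD 1 []
                   else PySem.List.pyRepeat (v.getD 0 []) r
      piece ++ pvToNB rest (n - k * r)

def toNumeralsAlt (n : Int) : List Char := pvToNB pvNumerals n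

-- the outer while loop: each step consumes one whole run (inner while = takeWhile/dropWhile).
def pvRepGo : List Char → List Char
  | [] => []
  | c :: cs =>
    toNumeralsAlt (1 + ((cs.takeWhile (· == c)).length : Int)) ++ [c]
      ++ pvRepGo (cs.dropWhile (· == c))
termination_by cs => cs.length
decreasing_by
  exact Nat.lt_succ_of_le (List.length_dropWhile_le _ _)

def represent_alt (string : String) : String :=
  String.ofList (pvRepGo string.toList)

-- ===== PRECONDITION & SPEC =====
-- Pre_ excludes exactly the strings containing 4000 consecutive equal characters: there the
-- Python A (and B, which computes the same per-key pieces) raises IndexError on NUMERALS[1000][1].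
def Pre_represent (string : String) : Prop :=
  ∀ i ∈ List.range string.toList.length,
    ¬ (((string.toList.drop i).take 4000).length = 4000 ∧
       ((string.toList.drop i).take 4000).all (fun c => c == string.toList.getD i ' ') = true)
instance (string : String) : Decidable (Pre_represent string) := by unfold Pre_represent; infer_instance
def pvWitness_represent : String := "ab"
def Spec_represent (string : String) (out : String) : Prop := out = represent_alt string
instance (string : String) (out : String) : Decidable (Spec_represent string out) := by unfold Spec_represent; infer_instance

-- ===== CLAIM (what is proved, stated in full; the proofs are below) =====
def Claim_equal_represent : Prop := ∀ (string : String), Dom_represent string → Pre_represent string → Spec_represent string (represent string)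

-- ===== LEMMAS AND PROOFS =====

lemma toNB_foldl (keys : List (Int × List (List Char))) :
    ∀ (acc : List Char) (n : Int),
      (keys.foldl pvStepN (acc, n)).1 = acc ++ pvToNB keys n := by
  induction keys with
  | nil => intro acc n; simp [pvToNB]
  | cons kv rest ih =>
    intro acc n
    obtain ⟨k, v⟩ := kv
    rw [List.foldl_cons]
    by_cases h : n ≥ k
    · have h' : ¬ n < k := not_lt.mpr h
      by_cases hr : PySem.Int.floordiv n k > 3 <;>
        simp [pvStepN, h, hr, ih, pvToNB, h']
    · have h' : n < k := lt_of_not_ge h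
      simp [pvStepN, h, ih, pvToNB, h']

lemma toNum_eq (n : Int) : toNumerals n = toNumeralsAlt n := by
  simpa [toNumerals, toNumeralsAlt] using toNB_foldl pvNumerals [] n

lemma pvRepGo_nil : pvRepGo [] = [] := by rw [pvRepGo.eq_def]

lemma pvRepGo_cons (c : Char) (cs : List Char) :
    pvRepGo (c :: cs)
      = toNumeralsAlt (1 + ((cs.takeWhile (· == c)).length : Int)) ++ [c]
          ++ pvRepGo (cs.dropWhile (· == c)) := by
  rw [pvRepGo.eq_def]

def pvRender (st : List Char × List Char × Int) : List Char :=
  st.1 ++ toNumerals st.2.2 ++ st.2.1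

lemma pvMain (cs : List Char) : ∀ (c : Char) (o : Int) (f : List Char),
    pvRender (cs.foldl pvStepA (f, [c], o))
      = f ++ toNumeralsAlt (o + ((cs.takeWhile (· == c)).length : Int)) ++ [c]
          ++ pvRepGo (cs.dropWhile (· == c)) := by
  induction cs with
  | nil =>
    intro c o f
    simp [pvRender, pvRepGo_nil, toNum_eq]
  | cons d cs ih =>
    intro c o f
    by_cases h : d = c
    · subst h
      have := ih d (o + 1) f
      simp only [List.takeWhile_cons_of_pos, List.dropWhile_cons_of_pos,
        beq_self_eq_true] at *
      rw [List.foldl_cons]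
      have hstep : pvStepA (f, [d], o) d = (f, [d], o + 1) := by
        simp [pvStepA]
      rw [hstep, ih]
      congr 3
      simp only [List.length_cons]
      push_cast
      ring
    · have h1 : ([d] == [c]) = false := by
        simp [h]
      have h2 : (d == c) = false := by
        simpa [beq_eq_false_iff_ne] using h
      rw [List.foldl_cons]
      have hstep : pvStepA (f, [c], o) d = (f ++ toNumerals o ++ [c], [d], 1) := by
        simp [pvStepA, h1]
      rw [hstep, ih d 1 (f ++ toNumerals o ++ [c])]
      rw [List.takeWhile_cons_of_neg (by simp [h2]), List.dropWhile_cons_of_neg (by simp [h2])]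
      rw [pvRepGo_cons]
      simp [toNum_eq]

lemma pv_eq (string : String) : represent string = represent_alt string := by
  unfold represent represent_alt
  cases h : string.toList with
  | nil => simp [pvRepGo_nil, toNumerals, pvNumerals, pvStepN]
  | cons c cs =>
    have h1 : pvStepA ([], [], 0) c = ([] ++ toNumerals 0 ++ [], [c], 1) := by
      simp [pvStepA]
    have hz : toNumerals 0 = [] := by rfl
    have := pvMain cs c 1 []
    simp only [pvRender] at this
    rw [List.foldl_cons, h1]
    simp only [hz, List.append_nil, List.nil_append] at this ⊢
    rw [show (cs.foldl pvStepA ([], [c], 1)).1 ++ toNumerals (cs.foldl pvStepA ([], [c], 1)).2.2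
          ++ (cs.foldl pvStepA ([], [c], 1)).2.1
        = toNumeralsAlt (1 + ((cs.takeWhile (· == c)).length : Int)) ++ [c]
          ++ pvRepGo (cs.dropWhile (· == c)) from this]
    rw [pvRepGo_cons]

-- ===== VERDICT (by name: the statement is the Claim_ definition above) =====
theorem represent_spec : Claim_equal_represent := by
  intro s _ _
  unfold Spec_represent
  exact pv_eq s
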